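-- pv_equiv track=rewrite | github.com/human-software-language/hsl | experiments/browser_plan.py | check_expected_output_format
-- ===== SOURCE A (Python) =====
-- def check_expected_output_format(text):
--     """
--     Checks if the given text matches the expected format "table: element1, element2, ...".
--
--     Args:
--     - text (str): The input text to check.
--
--     Returns:
--     - bool: True if the text matches the expected format, False otherwise.
--     """
--     # Step 1: Check Prefix
--     if not text.startswith("table:"):
--         return False
--
--     # Remove "table:" and strip leading/trailing whitespace
--     elements_str = text[len("table:") :].strip()
--
--     # Step 2: Split Elements
--     elements = elements_str.split(",")
--
--     # Step 3: Trim and Validate Elements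
--     for element in elements:
--         trimmed_element = element.strip()
--         # Ensure element is non-empty
--         if not trimmed_element:
--             return False
--         # Additional element validation can go here (e.g., check for allowed characters)
--
--     # Step 4: Return Result
--     return True
-- ===== SOURCE B (Python) =====
-- def check_expected_output_format(text):
--     if not text.startswith("table:"):
--         return False
--     s = text[len("table:"):].strip()
--     has = False  # current comma-separated field has a non-whitespace char
--     for ch in s:
--         if ch == ',':
--             if not has:
--                 return False
--             has = False
--         elif not ch.isspace():
--             has = True
--     return has
-- ===== Notes on version B (the rewrite author's own statement) =====
-- stated objective: alternative
-- what changed: Replaces A's split-on-comma plus per-element strip-and-check loop with a single left-to-right scan of the stripped remainder that tracks whether the current field has seen a non-whitespace character, never materialising the field list.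
import Mathlib
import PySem

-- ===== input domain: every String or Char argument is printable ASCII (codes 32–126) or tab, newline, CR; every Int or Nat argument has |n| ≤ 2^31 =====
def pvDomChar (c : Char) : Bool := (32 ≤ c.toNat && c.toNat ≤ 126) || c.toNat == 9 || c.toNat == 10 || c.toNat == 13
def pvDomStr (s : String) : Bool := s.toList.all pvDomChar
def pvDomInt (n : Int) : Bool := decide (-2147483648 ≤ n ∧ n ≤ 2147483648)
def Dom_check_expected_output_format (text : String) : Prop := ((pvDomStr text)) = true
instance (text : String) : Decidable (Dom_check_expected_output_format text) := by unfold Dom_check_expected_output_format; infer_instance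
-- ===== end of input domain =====

-- B replaces A's split(',')-then-loop validation by a single left-to-right scan that tracks
-- whether the current field contains a non-whitespace character (objective: alternative, one
-- pass without materialising the field list).

-- ===== PORT A =====
-- A's for-loop with early 'return False': check each split element's strip is non-empty.
def pvCheckElems : List (List Char) → Bool
  | [] => true
  | e :: rest =>
      if PySem.Chars.strip e = [] then false else pvCheckElems rest

def check_expected_output_format (text : String) : Bool :=
  if !(PySem.Str.startswith text "table:") then false
  else
    let elements_str := PySem.Chars.strip
      (PySem.List.slice text.toList (some (PySem.Str.len "table:")) none)
    let elements := PySem.Chars.splitOn elements_str ",".toList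
    pvCheckElems elements

-- ===== PORT B =====
-- B's single scan: `has` = current comma-separated field has a non-whitespace char so far.
def pvScan : List Char → Bool → Bool
  | [], has => has
  | c :: cs, has =>
      if c = ',' then (if has then pvScan cs false else false)
      else if PySem.Chars.isspace c then pvScan cs has
      else pvScan cs true

def check_expected_output_format_alt (text : String) : Bool :=
  if !(PySem.Str.startswith text "table:") then false
  else
    pvScan (PySem.Chars.strip
      (PySem.List.slice text.toList (some (PySem.Str.len "table:")) none)) false

-- ===== PRECONDITION & SPEC =====
def Spec_check_expected_output_format (text : String) (out : Bool) : Prop := out = check_expected_output_format_alt text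
instance (text : String) (out : Bool) : Decidable (Spec_check_expected_output_format text out) := by unfold Spec_check_expected_output_format; infer_instance

-- ===== CLAIM (what is proved, stated in full; the proofs are below) =====
def Claim_equal_check_expected_output_format : Prop := ∀ (text : String), Dom_check_expected_output_format text → Spec_check_expected_output_format text (check_expected_output_format text)

-- ===== LEMMAS AND PROOFS =====

-- head field / remaining fields of splitting on ',' (proof-side model of splitOn)
def pvSplit : List Char → List Char × List (List Char)
  | [] => ([], [])
  | c :: cs =>
      if c = ',' then ([], (pvSplit cs).1 :: (pvSplit cs).2)
      else (c :: (pvSplit cs).1, (pvSplit cs).2)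

theorem pvGo_eq (fuel : Nat) : ∀ (l cur acc : List Char) (accs : List (List Char)),
    l.length < fuel →
    PySem.Chars.splitOn.go [','] fuel l cur accs =
      accs.reverse ++ (cur.reverse ++ (pvSplit l).1) :: (pvSplit l).2 := by
  induction fuel with
  | zero => intro l cur acc accs h; omega
  | succ f ih =>
      intro l cur acc accs h
      cases l with
      | nil => simp [PySem.Chars.splitOn.go, pvSplit]
      | cons c rest =>
          by_cases hc : c = ','
          · subst hc
            simp only [PySem.Chars.splitOn.go, List.isPrefixOf, List.length_cons] at *
            rw [if_pos (by simp)]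
            rw [show List.drop ([].length + 1) (',' :: rest) = rest from rfl,
                ih rest [] acc (cur.reverse :: accs) (by simpa using Nat.lt_of_succ_lt_succ h)]
            simp [pvSplit]
          · simp only [PySem.Chars.splitOn.go]
            rw [if_neg (by simp [List.isPrefixOf]; exact fun h' => hc h'.symm)]
            rw [ih rest (c :: cur) acc accs (by simpa using Nat.lt_of_succ_lt_succ h)]
            simp [pvSplit, hc]

theorem pvSplitOn_eq (l : List Char) :
    PySem.Chars.splitOn l [','] = (pvSplit l).1 :: (pvSplit l).2 := by
  have := pvGo_eq (l.length + 1) l [] [] [] (by omega)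
  simpa [PySem.Chars.splitOn] using this

theorem pvStrip_cons_space (c : Char) (f : List Char) (h : PySem.Chars.isspace c = true) :
    PySem.Chars.strip (c :: f) = PySem.Chars.strip f := by
  simp [PySem.Chars.strip, PySem.Chars.lstrip, List.dropWhile, h]

theorem pvStrip_cons_nonspace (c : Char) (f : List Char) (h : PySem.Chars.isspace c = false) :
    PySem.Chars.strip (c :: f) ≠ [] := by
  simp only [PySem.Chars.strip, PySem.Chars.lstrip, PySem.Chars.rstrip, List.dropWhile, h]
  intro hcon
  rw [List.reverse_eq_nil_iff, List.dropWhile_eq_nil_iff] at hcon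
  have := hcon c (by simp)
  simp [h] at this

-- the scan computes exactly A's per-field check overNotes pvSplit's fields
theorem pvScan_spec (cs : List Char) :
    pvScan cs true = pvCheckElems (pvSplit cs).2 ∧
    pvScan cs false =
      (if PySem.Chars.strip (pvSplit cs).1 = [] then false else pvCheckElems (pvSplit cs).2) := by
  induction cs with
  | nil => simp [pvScan, pvSplit, pvCheckElems, PySem.Chars.strip, PySem.Chars.lstrip,
      PySem.Chars.rstrip]
  | cons c rest ih =>
      by_cases hc : c = ','
      · subst hc
        constructor
        · simp only [pvScan, if_pos trivial, pvSplit, pvCheckElems]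
          exact ih.2
        · simp [pvScan, pvSplit, PySem.Chars.strip, PySem.Chars.lstrip,
            PySem.Chars.rstrip]
      · by_cases hs : PySem.Chars.isspace c = true
        · have h1 : pvScan (c :: rest) true = pvScan rest true := by
            simp [pvScan, hc, hs]
          have h2 : pvScan (c :: rest) false = pvScan rest false := by
            simp [pvScan, hc, hs]
          refine ⟨?_, ?_⟩
          · rw [h1, ih.1]; simp [pvSplit, hc]
          · rw [h2, ih.2]; simp [pvSplit, hc, pvStrip_cons_space c _ hs]
        · have hs' : PySem.Chars.isspace c = false := by simpa using hs
          have h1 : pvScan (c :: rest) true = pvScan rest true := by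
            simp [pvScan, hc, hs']
          have h2 : pvScan (c :: rest) false = pvScan rest true := by
            simp [pvScan, hc, hs']
          refine ⟨?_, ?_⟩
          · rw [h1, ih.1]; simp [pvSplit, hc]
          · rw [h2, ih.1]
            simp [pvSplit, hc, if_neg (pvStrip_cons_nonspace c _ hs')]

theorem pvCheck_eq_scan (cs : List Char) :
    pvCheckElems (PySem.Chars.splitOn cs [',']) = pvScan cs false := by
  rw [pvSplitOn_eq, (pvScan_spec cs).2]
  simp [pvCheckElems]

-- ===== VERDICT (by name: the statement is the Claim_ definition above) =====
theorem check_expected_output_format_spec : Claim_equal_check_expected_output_format := by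
  intro text _
  unfold Spec_check_expected_output_format
  unfold check_expected_output_format check_expected_output_format_alt
  rw [show (",".toList : List Char) = [','] from rfl, pvCheck_eq_scan]
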